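-- pv_equiv track=rewrite | github.com/OssieLin/Comparative-Analysis-of-Primality-Testing-Algorithms | main.py | lucas_type_primality_test
-- ===== SOURCE A (Python) =====
-- def lucas_type_primality_test(n, c0, c1):
--     a = 2
--     b = c1
--     for _ in range(n - 1):
--         c = (c1 * b + c0 * a) % n
--         a = b
--         b = c
--     # Check if number passes the cpn Primality test
--     return (b - c1) % n == 0
-- ===== SOURCE B (Python) =====
-- def _mat_mul_mod(A, B, n):
--     a, b, c, d = A
--     e, f, g, h = B
--     return ((a * e + b * g) % n, (a * f + b * h) % n,
--             (c * e + d * g) % n, (c * f + d * h) % n)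
--
--
-- def lucas_type_primality_test(n, c0, c1):
--     # x0 = 2, x1 = c1, x_{k+2} = c1*x_{k+1} + c0*x_k; compute x_n mod n by
--     # binary exponentiation of the companion matrix [[c1, c0], [1, 0]].
--     e = n - 1
--     M = (c1, c0, 1, 0)
--     R = (1, 0, 0, 1)
--     while e > 0:
--         if e % 2 == 1:
--             R = _mat_mul_mod(M, R, n)
--         M = _mat_mul_mod(M, M, n)
--         e //= 2
--     b = (R[0] * c1 + R[1] * 2) % n
--     return (b - c1) % n == 0
-- ===== Notes on version B (the rewrite author's own statement) =====
-- stated objective: faster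
-- what changed: Replaces the (n-1)-step linear iteration of the recurrence with O(log n) binary exponentiation of the 2x2 companion matrix mod n.
import Mathlib
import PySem

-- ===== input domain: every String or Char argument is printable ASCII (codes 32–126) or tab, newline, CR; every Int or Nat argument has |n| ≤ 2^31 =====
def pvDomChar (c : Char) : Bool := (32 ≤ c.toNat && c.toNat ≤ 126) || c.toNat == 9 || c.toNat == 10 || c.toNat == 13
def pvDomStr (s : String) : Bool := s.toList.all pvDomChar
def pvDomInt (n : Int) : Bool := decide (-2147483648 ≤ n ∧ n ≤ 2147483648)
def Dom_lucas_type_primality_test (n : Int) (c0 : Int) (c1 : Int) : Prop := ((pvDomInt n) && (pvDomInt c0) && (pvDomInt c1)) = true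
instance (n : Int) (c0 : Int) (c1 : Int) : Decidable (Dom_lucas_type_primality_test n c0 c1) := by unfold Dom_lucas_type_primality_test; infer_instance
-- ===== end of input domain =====

-- B replaces A's (n-1)-step iteration of the recurrence by binary exponentiation
-- of the 2x2 companion matrix mod n (objective: faster).

-- ===== PORT A =====
def lucas_type_primality_test (n : Int) (c0 : Int) (c1 : Int) : Bool :=
  let st := (PySem.List.pyRange 0 (n - 1) 1).foldl
    (fun (p : Int × Int) _ => (p.2, PySem.Int.mod (c1 * p.2 + c0 * p.1) n)) (2, c1)
  decide (PySem.Int.mod (st.2 - c1) n = 0)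

-- ===== PORT B =====
-- 2x2 matrix as (a, b, c, d) = [[a, b], [c, d]]; entries reduced with Python's %.
def pvMmul (A B : Int × Int × Int × Int) (n : Int) : Int × Int × Int × Int :=
  (PySem.Int.mod (A.1 * B.1 + A.2.1 * B.2.2.1) n,
   PySem.Int.mod (A.1 * B.2.1 + A.2.1 * B.2.2.2) n,
   PySem.Int.mod (A.2.2.1 * B.1 + A.2.2.2 * B.2.2.1) n,
   PySem.Int.mod (A.2.2.1 * B.2.1 + A.2.2.2 * B.2.2.2) n)

-- the while loop of Source B: square-and-multiply on the exponent e
def pvPowLoop (M R : Int × Int × Int × Int) (e n : Int) : Int × Int × Int × Int :=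
  if _h : 0 < e then
    let R' := if PySem.Int.mod e 2 = 1 then pvMmul M R n else R
    pvPowLoop (pvMmul M M n) R' (PySem.Int.floordiv e 2) n
  else R
termination_by e.toNat
decreasing_by
  rw [PySem.Int.floordiv_eq_ediv_of_pos (by omega : (0:Int) < 2)]
  omega

def lucas_type_primality_test_alt (n : Int) (c0 : Int) (c1 : Int) : Bool :=
  let R := pvPowLoop (c1, c0, 1, 0) (1, 0, 0, 1) (n - 1) n
  let b := PySem.Int.mod (R.1 * c1 + R.2.1 * 2) n
  decide (PySem.Int.mod (b - c1) n = 0)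

-- ===== PRECONDITION & SPEC =====
-- Pre_ excludes exactly n = 0, where Python A raises ZeroDivisionError ('% n').
def Pre_lucas_type_primality_test (n : Int) (c0 : Int) (c1 : Int) : Prop := n ≠ 0
instance (n : Int) (c0 : Int) (c1 : Int) : Decidable (Pre_lucas_type_primality_test n c0 c1) := by unfold Pre_lucas_type_primality_test; infer_instance

def pvWitness_lucas_type_primality_test : Int × Int × Int := (7, 1, 1)

def Spec_lucas_type_primality_test (n : Int) (c0 : Int) (c1 : Int) (out : Bool) : Prop := out = lucas_type_primality_test_alt n c0 c1
instance (n : Int) (c0 : Int) (c1 : Int) (out : Bool) : Decidable (Spec_lucas_type_primality_test n c0 c1 out) := by unfold Spec_lucas_type_primality_test; infer_instance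

-- ===== CLAIM (what is proved, stated in full; the proofs are below) =====
def Claim_equal_lucas_type_primality_test : Prop := ∀ (n : Int) (c0 : Int) (c1 : Int), Dom_lucas_type_primality_test n c0 c1 → Pre_lucas_type_primality_test n c0 c1 → Spec_lucas_type_primality_test n c0 c1 (lucas_type_primality_test n c0 c1)

-- ===== LEMMAS AND PROOFS =====

-- the exact (un-reduced) recurrence x0 = 2, x1 = c1, x_{k+2} = c1*x_{k+1} + c0*x_k
def pvX (c0 c1 : Int) : Nat → Int
  | 0 => 2
  | 1 => c1
  | (k+2) => c1 * pvX c0 c1 (k+1) + c0 * pvX c0 c1 k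

-- exact 2x2 matrix product and power
def pvMmulE (A B : Int × Int × Int × Int) : Int × Int × Int × Int :=
  (A.1 * B.1 + A.2.1 * B.2.2.1,
   A.1 * B.2.1 + A.2.1 * B.2.2.2,
   A.2.2.1 * B.1 + A.2.2.2 * B.2.2.1,
   A.2.2.1 * B.2.1 + A.2.2.2 * B.2.2.2)

def pvPowE (M : Int × Int × Int × Int) : Nat → Int × Int × Int × Int
  | 0 => (1, 0, 0, 1)
  | (k+1) => pvMmulE M (pvPowE M k)

-- entrywise congruence mod n
def pvMEq (n : Int) (A B : Int × Int × Int × Int) : Prop :=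
  Int.ModEq n A.1 B.1 ∧ Int.ModEq n A.2.1 B.2.1 ∧ Int.ModEq n A.2.2.1 B.2.2.1 ∧ Int.ModEq n A.2.2.2 B.2.2.2

lemma pvMod_cong (a n : Int) : Int.ModEq n (PySem.Int.mod a n) a := by
  have h := PySem.Int.floordiv_mul_add_mod a n
  exact (Int.modEq_iff_dvd.mpr ⟨-PySem.Int.floordiv a n, by linear_combination h⟩).symm

lemma pvMmul_cong (n : Int) (A B A' B' : Int × Int × Int × Int)
    (hA : pvMEq n A A') (hB : pvMEq n B B') : pvMEq n (pvMmul A B n) (pvMmulE A' B') := by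
  obtain ⟨a1, a2, a3, a4⟩ := hA
  obtain ⟨b1, b2, b3, b4⟩ := hB
  exact ⟨(pvMod_cong _ n).trans ((a1.mul b1).add (a2.mul b3)),
         (pvMod_cong _ n).trans ((a1.mul b2).add (a2.mul b4)),
         (pvMod_cong _ n).trans ((a3.mul b1).add (a4.mul b3)),
         (pvMod_cong _ n).trans ((a3.mul b2).add (a4.mul b4))⟩

lemma pvMEq_refl (n : Int) (A : Int × Int × Int × Int) : pvMEq n A A :=
  ⟨Int.ModEq.refl _, Int.ModEq.refl _, Int.ModEq.refl _, Int.ModEq.refl _⟩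

lemma pvMmulE_assoc (A B C : Int × Int × Int × Int) :
    pvMmulE (pvMmulE A B) C = pvMmulE A (pvMmulE B C) := by
  obtain ⟨a, b, c, d⟩ := A; obtain ⟨e, f, g, h⟩ := B; obtain ⟨i, j, k, l⟩ := C
  simp only [pvMmulE, Prod.mk.injEq]
  refine ⟨by ring, by ring, by ring, by ring⟩

lemma pvMmulE_one_left (A : Int × Int × Int × Int) : pvMmulE (1, 0, 0, 1) A = A := by
  obtain ⟨a, b, c, d⟩ := A
  simp [pvMmulE]

lemma pvMmulE_one_right (A : Int × Int × Int × Int) : pvMmulE A (1, 0, 0, 1) = A := by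
  obtain ⟨a, b, c, d⟩ := A
  simp [pvMmulE]

lemma pvPowE_comm (M : Int × Int × Int × Int) (k : Nat) :
    pvMmulE (pvPowE M k) M = pvMmulE M (pvPowE M k) := by
  induction k with
  | zero => rw [pvPowE, pvMmulE_one_left, pvMmulE_one_right]
  | succ k ih => rw [pvPowE, pvMmulE_assoc, ih]

lemma pvPowE_two_mul (M : Int × Int × Int × Int) (k : Nat) :
    pvPowE (pvMmulE M M) k = pvPowE M (2 * k) := by
  induction k with
  | zero => rfl
  | succ k ih =>
    have h2 : 2 * (k + 1) = (2 * k) + 1 + 1 := by omega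
    rw [h2, pvPowE, ih, pvPowE, pvPowE, pvMmulE_assoc]

-- invariant of the square-and-multiply loop: pvPowLoop M R e n ≡ Mt^e * Rt  (mod n)
lemma pvPowLoop_spec (n : Int) : ∀ (m : Nat) (e : Int), e.toNat = m → 0 ≤ e →
    ∀ (M R Mt Rt : Int × Int × Int × Int), pvMEq n M Mt → pvMEq n R Rt →
    pvMEq n (pvPowLoop M R e n) (pvMmulE (pvPowE Mt e.toNat) Rt) := by
  intro m
  induction m using Nat.strong_induction_on with
  | _ m ih =>
    intro e hm he M R Mt Rt hM hR
    by_cases hpos : 0 < e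
    · rw [pvPowLoop]
      simp only [hpos, dif_pos]
      have hdiv : PySem.Int.floordiv e 2 = e / 2 := PySem.Int.floordiv_eq_ediv_of_pos (by omega)
      have hmod : PySem.Int.mod e 2 = e % 2 := PySem.Int.mod_eq_emod_of_pos (by omega)
      rw [hdiv, hmod]
      have hMM : pvMEq n (pvMmul M M n) (pvMmulE Mt Mt) := pvMmul_cong n M M Mt Mt hM hM
      have hrec := ih (e / 2).toNat (by subst hm; omega) (e / 2) rfl (by omega)
        (pvMmul M M n)
        (if e % 2 = 1 then pvMmul M R n else R)
        (pvMmulE Mt Mt)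
        (if e % 2 = 1 then pvMmulE Mt Rt else Rt)
        hMM ?_
      · have hkey : pvMmulE (pvPowE (pvMmulE Mt Mt) (e / 2).toNat)
            (if e % 2 = 1 then pvMmulE Mt Rt else Rt)
            = pvMmulE (pvPowE Mt e.toNat) Rt := by
          rw [pvPowE_two_mul]
          by_cases hr : e % 2 = 1
          · rw [if_pos hr]
            have hexp : e.toNat = 2 * (e / 2).toNat + 1 := by omega
            rw [hexp, pvPowE, ← pvMmulE_assoc, ← pvPowE_comm, pvMmulE_assoc]
          · rw [if_neg hr]
            have hexp : e.toNat = 2 * (e / 2).toNat := by omega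
            rw [hexp]
        rw [← hkey]
        exact hrec
      · by_cases hr : e % 2 = 1
        · rw [if_pos hr, if_pos hr]
          exact pvMmul_cong n M R Mt Rt hM hR
        · rw [if_neg hr, if_neg hr]
          exact hR
    · rw [pvPowLoop]
      simp only [hpos, dif_neg, not_false_iff]
      have he0 : e.toNat = 0 := by omega
      rw [he0, pvPowE, pvMmulE_one_left]
      exact hR

-- a foldl that ignores the elements is iteration by the length
lemma pvFoldl_const {α β : Type} (g : α → α) :
    ∀ (l : List β) (s : α), l.foldl (fun a _ => g a) s = g^[l.length] s := by
  intro l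
  induction l with
  | nil => intro s; rfl
  | cons x xs ih =>
    intro s
    rw [List.foldl_cons, ih, List.length_cons, Function.iterate_succ_apply]

-- A's loop state after k steps: componentwise congruent to (X k, X (k+1)) mod n
lemma pvIterA (n c0 c1 : Int) (k : Nat) :
    Int.ModEq n (((fun p : Int × Int => (p.2, PySem.Int.mod (c1 * p.2 + c0 * p.1) n))^[k] (2, c1)).1) (pvX c0 c1 k) ∧
    Int.ModEq n (((fun p : Int × Int => (p.2, PySem.Int.mod (c1 * p.2 + c0 * p.1) n))^[k] (2, c1)).2) (pvX c0 c1 (k + 1)) := by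
  induction k with
  | zero => exact ⟨Int.ModEq.refl _, Int.ModEq.refl _⟩
  | succ k ih =>
    obtain ⟨h1, h2⟩ := ih
    rw [Function.iterate_succ_apply']
    refine ⟨h2, ?_⟩
    show Int.ModEq n (PySem.Int.mod (c1 * _ + c0 * _) n) (pvX c0 c1 (k + 2))
    have : pvX c0 c1 (k + 2) = c1 * pvX c0 c1 (k + 1) + c0 * pvX c0 c1 k := rfl
    rw [this]
    exact (pvMod_cong _ n).trans (((Int.ModEq.refl c1).mul h2).add ((Int.ModEq.refl c0).mul h1))

-- the exact matrix power applied to the start vector (c1, 2) yields (X (k+1), X k)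
lemma pvPowE_vec (c0 c1 : Int) (k : Nat) :
    (pvPowE (c1, c0, 1, 0) k).1 * c1 + (pvPowE (c1, c0, 1, 0) k).2.1 * 2 = pvX c0 c1 (k + 1) ∧
    (pvPowE (c1, c0, 1, 0) k).2.2.1 * c1 + (pvPowE (c1, c0, 1, 0) k).2.2.2 * 2 = pvX c0 c1 k := by
  induction k with
  | zero =>
    constructor
    · show 1 * c1 + 0 * 2 = pvX c0 c1 1
      rw [pvX]; ring
    · show 0 * c1 + 1 * 2 = pvX c0 c1 0
      rw [pvX]; ring
  | succ k ih =>
    obtain ⟨h1, h2⟩ := ih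
    rw [pvPowE]
    constructor
    · show (c1 * (pvPowE (c1, c0, 1, 0) k).1 + c0 * (pvPowE (c1, c0, 1, 0) k).2.2.1) * c1 +
        (c1 * (pvPowE (c1, c0, 1, 0) k).2.1 + c0 * (pvPowE (c1, c0, 1, 0) k).2.2.2) * 2 = pvX c0 c1 (k + 2)
      have hX : pvX c0 c1 (k + 2) = c1 * pvX c0 c1 (k + 1) + c0 * pvX c0 c1 k := rfl
      rw [hX, ← h1, ← h2]; ring
    · show (1 * (pvPowE (c1, c0, 1, 0) k).1 + 0 * (pvPowE (c1, c0, 1, 0) k).2.2.1) * c1 +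
        (1 * (pvPowE (c1, c0, 1, 0) k).2.1 + 0 * (pvPowE (c1, c0, 1, 0) k).2.2.2) * 2 = pvX c0 c1 (k + 1)
      rw [← h1]; ring

-- the two final residues are congruent mod n
lemma pvFinal_cong (n c0 c1 : Int) :
    Int.ModEq n
      (((PySem.List.pyRange 0 (n - 1) 1).foldl
        (fun (p : Int × Int) _ => (p.2, PySem.Int.mod (c1 * p.2 + c0 * p.1) n)) (2, c1)).2)
      (PySem.Int.mod ((pvPowLoop (c1, c0, 1, 0) (1, 0, 0, 1) (n - 1) n).1 * c1 +
        (pvPowLoop (c1, c0, 1, 0) (1, 0, 0, 1) (n - 1) n).2.1 * 2) n) := by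
  by_cases hpos : 1 ≤ n
  · -- loop runs (n-1).toNat times; both sides ≡ X ((n-1).toNat + 1)
    rw [pvFoldl_const]
    rw [PySem.List.length_pyRange_one]
    have hlen : (n - 1 - 0).toNat = (n - 1).toNat := by omega
    rw [hlen]
    have hA := (pvIterA n c0 c1 (n - 1).toNat).2
    have hB := pvPowLoop_spec n (n - 1).toNat (n - 1) rfl (by omega)
      (c1, c0, 1, 0) (1, 0, 0, 1) (c1, c0, 1, 0) (1, 0, 0, 1)
      (pvMEq_refl n _) (pvMEq_refl n _)
    rw [pvMmulE_one_right] at hB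
    obtain ⟨hb1, hb2, _, _⟩ := hB
    have hvec := (pvPowE_vec c0 c1 (n - 1).toNat).1
    have hBfin : Int.ModEq n
        (PySem.Int.mod ((pvPowLoop (c1, c0, 1, 0) (1, 0, 0, 1) (n - 1) n).1 * c1 +
          (pvPowLoop (c1, c0, 1, 0) (1, 0, 0, 1) (n - 1) n).2.1 * 2) n)
        (pvX c0 c1 ((n - 1).toNat + 1)) := by
      refine (pvMod_cong _ n).trans ?_
      rw [← hvec]
      exact (hb1.mul (Int.ModEq.refl c1)).add (hb2.mul (Int.ModEq.refl 2))
    exact hA.trans hBfin.symm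
  · -- n ≤ 0: both loops are skipped; LHS = c1, RHS = c1 % n
    rw [PySem.List.pyRange_one_eq_nil (by omega)]
    rw [pvPowLoop]
    simp only [show ¬(0 < n - 1) by omega, dif_neg, not_false_iff]
    show Int.ModEq n c1 (PySem.Int.mod (1 * c1 + 0 * 2) n)
    have h : (1 : Int) * c1 + 0 * 2 = c1 := by ring
    rw [h]
    exact (pvMod_cong c1 n).symm

-- ===== VERDICT (by name: the statement is the Claim_ definition above) =====
theorem lucas_type_primality_test_spec : Claim_equal_lucas_type_primality_test := by
  intro n c0 c1 _hdom _hpre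
  unfold Spec_lucas_type_primality_test lucas_type_primality_test lucas_type_primality_test_alt
  have hcong := pvFinal_cong n c0 c1
  have hiff : (PySem.Int.mod
        ((((PySem.List.pyRange 0 (n - 1) 1).foldl
          (fun (p : Int × Int) _ => (p.2, PySem.Int.mod (c1 * p.2 + c0 * p.1) n)) (2, c1)).2) - c1) n = 0) ↔
      (PySem.Int.mod ((PySem.Int.mod ((pvPowLoop (c1, c0, 1, 0) (1, 0, 0, 1) (n - 1) n).1 * c1 +
        (pvPowLoop (c1, c0, 1, 0) (1, 0, 0, 1) (n - 1) n).2.1 * 2) n) - c1) n = 0) := by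
    rw [PySem.Int.mod_eq_zero_iff_dvd, PySem.Int.mod_eq_zero_iff_dvd]
    have hsub := hcong.sub_right c1
    rw [Int.dvd_iff_emod_eq_zero, Int.dvd_iff_emod_eq_zero]
    rw [hsub]
  exact decide_eq_decide.mpr hiff
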